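-- pv_equiv track=rewrite | github.com/sou05091/Algorithm | 수학/1193(분수찾기).py | find
-- ===== SOURCE A (Python) =====
-- def find(n):
--     rs = []
--     for i in range(1, n+1):
--         for j in range(1, n+1):
--             if (i+j)%2 == 1:
--                 rs.append((i, j))
--             else:
--                 rs.append((j, i))
--     sorted_rs = sorted(rs, key=lambda x: x[0]+x[1])
--     result = sorted_rs[n-1]
--     return f"{result[0]}/{result[1]}"
-- ===== SOURCE B (Python) =====
-- def find(n):
--     # walk diagonals: diagonal d (1-based) holds d fractions with numerator+denominator = d+1
--     d = 1
--     while d * (d + 1) // 2 < n: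
--         d += 1
--     k = n - d * (d - 1) // 2   # 1-based position inside diagonal d
--     s = d + 1                  # numerator + denominator on this diagonal
--     if s % 2 == 1:
--         return f"{k}/{s - k}"
--     else:
--         return f"{s - k}/{k}"
-- ===== Notes on version B (the rewrite author's own statement) =====
-- stated objective: faster
-- what changed: Instead of materialising the whole n-by-n grid of pairs and stably sorting it by numerator+denominator, B locates the diagonal containing the n-th fraction by scanning triangular numbers and computes the position inside it in closed form.
import Mathlib
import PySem

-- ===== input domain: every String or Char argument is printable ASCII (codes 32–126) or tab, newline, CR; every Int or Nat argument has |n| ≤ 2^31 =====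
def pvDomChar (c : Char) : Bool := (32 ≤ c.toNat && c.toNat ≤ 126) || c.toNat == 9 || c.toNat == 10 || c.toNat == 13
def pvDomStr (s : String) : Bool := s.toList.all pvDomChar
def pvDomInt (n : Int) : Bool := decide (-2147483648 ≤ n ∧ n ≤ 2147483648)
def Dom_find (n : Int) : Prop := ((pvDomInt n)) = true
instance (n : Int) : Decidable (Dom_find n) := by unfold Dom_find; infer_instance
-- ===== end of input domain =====

-- B replaces "build the n×n grid, stably sort by numerator+denominator, index" by a
-- triangular-number scan locating the diagonal of the n-th fraction (objective: faster).

-- ===== PORT A =====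
-- Python's `sorted(rs, key=...)` (timsort: a stable O(N log N) sort) is ported as a stable
-- merge sort (tail-recursive, fuel = list length as a totality guard), PROVED below
-- (pvMsortEqSorted) to compute exactly PySem.List.sorted, the reference semantics of
-- sorted(..., key=...); PySem's insertion-sort primitive itself cannot be evaluated on the
-- quadratic-size lists this function builds.
def mergeF {α : Type} (key : α → Int) : Nat → List α → List α → List α → List α
  | 0, acc, l, r => acc.reverse ++ l ++ r
  | _+1, acc, [], r => acc.reverse ++ r
  | _+1, acc, a :: l, [] => acc.reverse ++ a :: l
  | f+1, acc, a :: l, b :: r =>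
    if key b < key a then mergeF key f (b :: acc) (a :: l) r
    else mergeF key f (a :: acc) l (b :: r)

def msortF {α : Type} (key : α → Int) : Nat → List α → List α
  | 0, l => l
  | f+1, l =>
    if l.length ≤ 1 then l
    else
      mergeF key l.length [] (msortF key f (l.take (l.length / 2)))
        (msortF key f (l.drop (l.length / 2)))

def find (n : Int) : String :=
  -- the two nested append loops build exactly the comprehension [entry(i,j) for i for j]
  let rs : List (Int × Int) :=
    (PySem.List.pyRange 1 (n+1) 1).flatMap (fun i =>
      (PySem.List.pyRange 1 (n+1) 1).map (fun j =>
        if PySem.Int.mod (i+j) 2 = 1 then (i, j) else (j, i)))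
  let sorted_rs := msortF (fun x => x.1 + x.2) rs.length rs
  match PySem.List.pyGet? sorted_rs (n-1) with
  | some result => PySem.Int.toStr result.1 ++ "/" ++ PySem.Int.toStr result.2
  | none => ""  -- IndexError in Python (n ≤ 0); excluded by Pre_find

-- ===== PORT B =====
-- termination helper for the while loop: d*(d-1) ≥ 0 for every integer d
theorem pvMulPredNonneg (d : Int) : 0 ≤ d * (d - 1) := by
  by_cases h : d ≤ 0
  · exact mul_nonneg_iff.mpr (Or.inr ⟨h, by omega⟩)
  · exact mul_nonneg (by omega) (by omega)

-- while d*(d+1)//2 < n: d += 1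
def findLoop (n d : Int) : Int :=
  if PySem.Int.floordiv (d*(d+1)) 2 < n then findLoop n (d+1) else d
termination_by (n - d).toNat
decreasing_by
  rename_i h
  have h2 : d ≤ PySem.Int.floordiv (d*(d+1)) 2 := by
    rw [PySem.Int.le_floordiv_iff_mul_le (by norm_num)]
    nlinarith [pvMulPredNonneg d]
  omega

def find_alt (n : Int) : String :=
  let d := findLoop n 1
  let k := n - PySem.Int.floordiv (d*(d-1)) 2
  let s := d + 1
  if PySem.Int.mod s 2 = 1
  then PySem.Int.toStr k ++ "/" ++ PySem.Int.toStr (s - k)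
  else PySem.Int.toStr (s - k) ++ "/" ++ PySem.Int.toStr k

-- ===== PRECONDITION & SPEC =====
-- Pre_find excludes n ≤ 0, where the Python A raises IndexError (rs is empty / too short).
def Pre_find (n : Int) : Prop := 1 ≤ n
instance (n : Int) : Decidable (Pre_find n) := by unfold Pre_find; infer_instance
def pvWitness_find : Int := 3

def Spec_find (n : Int) (out : String) : Prop := out = find_alt n
instance (n : Int) (out : String) : Decidable (Spec_find n out) := by unfold Spec_find; infer_instance

-- ===== CLAIM (what is proved, stated in full; the proofs are below) =====
def Claim_equal_find : Prop := ∀ (n : Int), Dom_find n → Pre_find n → Spec_find n (find n)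

-- ===== LEMMAS AND PROOFS =====

-- the entry A stores for grid cell (i, j), and its sort key
def pvEnt (i j : Int) : Int × Int :=
  if PySem.Int.mod (i+j) 2 = 1 then (i, j) else (j, i)
def pvKey (p : Int × Int) : Int := p.1 + p.2

theorem pvKey_ent (i j : Int) : pvKey (pvEnt i j) = i + j := by
  unfold pvEnt pvKey; split
  · simp
  · simp; ring

-- A's list rs
def pvRs (n : Int) : List (Int × Int) :=
  (PySem.List.pyRange 1 (n+1) 1).flatMap (fun i =>
    (PySem.List.pyRange 1 (n+1) 1).map (fun j => pvEnt i j))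

-- the elements of rs lying on diagonal i+j = s, in row order
def pvDiag (n s : Int) : List (Int × Int) :=
  (PySem.List.pyRange 1 (n+1) 1).flatMap (fun i =>
    if 1 ≤ s - i ∧ s - i ≤ n then [pvEnt i (s - i)] else [])

-- the fully sorted list
def pvYs (n : Int) : List (Int × Int) :=
  (PySem.List.pyRange 2 (2*n+1) 1).flatMap (fun s => pvDiag n s)

-- ---- generic stable-sort characterisation ----

theorem pvPairwiseInsertBy {α : Type} (key : α → Int) (x : α) :
    ∀ (acc : List α), acc.Pairwise (fun a b => key a ≤ key b) →
    (PySem.List.insertBy (fun a b => decide (key a < key b)) x acc).Pairwise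
      (fun a b => key a ≤ key b) := by
  intro acc
  induction acc with
  | nil => intro _; simp [PySem.List.insertBy]
  | cons y ys ih =>
    intro hp
    simp only [PySem.List.insertBy]
    by_cases hb : key x < key y
    · rw [if_pos (decide_eq_true hb)]
      refine List.Pairwise.cons ?_ hp
      intro b hbm
      rcases List.mem_cons.mp hbm with rfl | hb'
      · exact le_of_lt hb
      · exact le_trans (le_of_lt hb) (List.rel_of_pairwise_cons hp hb')
    · rw [if_neg (by simpa using hb)]
      have hyx : key y ≤ key x := by omega
      refine List.Pairwise.cons ?_ (ih hp.of_cons)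
      intro b hbm
      rcases (PySem.List.mem_insertBy _ _ _ _).mp hbm with rfl | hb'
      · exact hyx
      · exact List.rel_of_pairwise_cons hp hb'

theorem pvFilterInsertBy {α : Type} (key : α → Int) (k : Int) (x : α) :
    ∀ (acc : List α), acc.Pairwise (fun a b => key a ≤ key b) →
    (PySem.List.insertBy (fun a b => decide (key a < key b)) x acc).filter
        (fun y => decide (key y = k)) =
      (if key x = k then acc.filter (fun y => decide (key y = k)) ++ [x]
       else acc.filter (fun y => decide (key y = k))) := by
  intro acc
  induction acc with
  | nil =>
    intro _
    simp only [PySem.List.insertBy, List.filter]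
    by_cases hxk : key x = k <;> simp [hxk]
  | cons y ys ih =>
    intro hp
    simp only [PySem.List.insertBy]
    by_cases hlt : key x < key y
    · rw [if_pos (decide_eq_true hlt)]
      by_cases hxk : key x = k
      · have hnil : (y :: ys).filter (fun z => decide (key z = k)) = [] := by
          rw [List.filter_eq_nil_iff]
          intro a ha
          have : key y ≤ key a := by
            rcases List.mem_cons.mp ha with rfl | ha'
            · exact le_refl _
            · exact List.rel_of_pairwise_cons hp ha'
          simp only [decide_eq_true_eq]
          omega
        rw [List.filter_cons_of_pos (by simp [hxk]), hnil]
        simp [hxk]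
      · rw [List.filter_cons_of_neg (by simp [hxk])]
        simp [hxk]
    · rw [if_neg (by simpa using hlt)]
      have ihs := ih hp.of_cons
      by_cases hyk : key y = k
      · rw [List.filter_cons_of_pos (by simp [hyk]), List.filter_cons_of_pos (by simp [hyk]), ihs]
        by_cases hxk : key x = k <;> simp [hxk]
      · rw [List.filter_cons_of_neg (by simp [hyk]), List.filter_cons_of_neg (by simp [hyk]), ihs]

theorem pvFilterSorted {α : Type} (key : α → Int) (k : Int) (xs : List α) :
    (PySem.List.sorted xs key false).filter (fun y => decide (key y = k)) =
      xs.filter (fun y => decide (key y = k)) := by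
  rw [PySem.List.sorted_eq_foldl_insertBy]
  have aux : ∀ (l : List α) (acc : List α), acc.Pairwise (fun a b => key a ≤ key b) →
      (l.foldl (fun acc x => PySem.List.insertBy (fun a b => decide (key a < key b)) x acc)
        acc).filter (fun y => decide (key y = k)) =
      acc.filter (fun y => decide (key y = k)) ++ l.filter (fun y => decide (key y = k)) := by
    intro l
    induction l with
    | nil => intro acc _; simp
    | cons x t iht =>
      intro acc hp
      simp only [List.foldl_cons]
      rw [iht _ (pvPairwiseInsertBy key x acc hp), pvFilterInsertBy key k x acc hp]
      by_cases hxk : key x = k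
      · rw [if_pos hxk, List.filter_cons_of_pos (by simp [hxk])]
        simp
      · rw [if_neg hxk, List.filter_cons_of_neg (by simp [hxk])]
  simpa using aux xs [] (List.Pairwise.nil)

theorem pvEqOfPairwiseFilter {α : Type} (key : α → Int) :
    ∀ (l₁ l₂ : List α), l₁.Pairwise (fun a b => key a ≤ key b) →
    l₂.Pairwise (fun a b => key a ≤ key b) →
    (∀ k, l₁.filter (fun x => decide (key x = k)) = l₂.filter (fun x => decide (key x = k))) →
    l₁ = l₂ := by
  intro l₁
  induction l₁ with
  | nil =>
    intro l₂ _ _ hf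
    cases l₂ with
    | nil => rfl
    | cons b t₂ =>
      exfalso
      have h := hf (key b)
      rw [List.filter_nil, List.filter_cons_of_pos (by simp)] at h
      exact List.cons_ne_nil _ _ h.symm
  | cons a t₁ ih =>
    intro l₂ hp1 hp2 hf
    cases l₂ with
    | nil =>
      exfalso
      have h := hf (key a)
      rw [List.filter_nil, List.filter_cons_of_pos (by simp)] at h
      exact List.cons_ne_nil _ _ h
    | cons b t₂ =>
      have hba : key b ≤ key a := by
        have h := hf (key a)
        have hne : (b :: t₂).filter (fun x => decide (key x = key a)) ≠ [] := by
          rw [← h, List.filter_cons_of_pos (by simp)]; exact List.cons_ne_nil _ _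
        have hex : ∃ x ∈ b :: t₂, key x = key a := by
          by_contra hc
          push Not at hc
          exact hne (List.filter_eq_nil_iff.mpr (fun x hx => by simp [hc x hx]))
        obtain ⟨x, hx, hxk⟩ := hex
        rcases List.mem_cons.mp hx with rfl | hx'
        · exact le_of_eq hxk
        · exact hxk ▸ List.rel_of_pairwise_cons hp2 hx'
      have hab : key a ≤ key b := by
        have h := hf (key b)
        have hne : (a :: t₁).filter (fun x => decide (key x = key b)) ≠ [] := by
          rw [h, List.filter_cons_of_pos (by simp)]; exact List.cons_ne_nil _ _
        have hex : ∃ x ∈ a :: t₁, key x = key b := by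
          by_contra hc
          push Not at hc
          exact hne (List.filter_eq_nil_iff.mpr (fun x hx => by simp [hc x hx]))
        obtain ⟨x, hx, hxk⟩ := hex
        rcases List.mem_cons.mp hx with rfl | hx'
        · exact le_of_eq hxk
        · exact hxk ▸ List.rel_of_pairwise_cons hp1 hx'
      have hkey : key a = key b := le_antisymm hab hba
      have hA := hf (key a)
      rw [List.filter_cons_of_pos (by simp), List.filter_cons_of_pos (by simp [hkey.symm])] at hA
      obtain ⟨hhd, htl⟩ := List.cons_eq_cons.mp hA
      have hrest : ∀ k, t₁.filter (fun x => decide (key x = k)) =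
          t₂.filter (fun x => decide (key x = k)) := by
        intro k
        by_cases hk : key a = k
        · subst hk; exact htl
        · have h := hf k
          rw [List.filter_cons_of_neg (by simp [hk]),
              List.filter_cons_of_neg (by simp [hkey ▸ hk])] at h
          exact h
      rw [hhd, ih t₂ hp1.of_cons hp2.of_cons hrest]

theorem pvSortedEq {α : Type} (key : α → Int) (xs ys : List α)
    (hp : ys.Pairwise (fun a b => key a ≤ key b))
    (hf : ∀ k, ys.filter (fun x => decide (key x = k)) = xs.filter (fun x => decide (key x = k))) :
    PySem.List.sorted xs key false = ys := by
  exact pvEqOfPairwiseFilter key _ _ (PySem.List.sorted_pairwise xs key) hp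
    (fun k => by rw [pvFilterSorted key k xs, hf k])

-- ---- A-side characterisation ----

theorem pvRsEq (n : Int) :
    (PySem.List.pyRange 1 (n+1) 1).flatMap (fun i =>
      (PySem.List.pyRange 1 (n+1) 1).map (fun j =>
        if PySem.Int.mod (i+j) 2 = 1 then (i, j) else (j, i))) = pvRs n := rfl

theorem pvMemDiagKey (n s : Int) : ∀ p ∈ pvDiag n s, pvKey p = s := by
  intro p hp
  simp only [pvDiag, List.mem_flatMap] at hp
  obtain ⟨i, _, hmem⟩ := hp
  split at hmem
  · rw [List.mem_singleton.mp hmem, pvKey_ent]; ring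
  · simp at hmem

theorem pvDiagEmpty (n s : Int) (h : s < 2 ∨ 2*n < s) : pvDiag n s = [] := by
  unfold pvDiag
  rw [List.flatMap_eq_nil_iff]
  intro i hi
  have hmem := (PySem.List.mem_pyRange_one).mp hi
  rw [if_neg (by omega)]

theorem pvFilterEqSingle (l : List Int) (hnd : l.Nodup) (c : Int) :
    l.filter (fun x => decide (x = c)) = if c ∈ l then [c] else [] := by
  induction l with
  | nil => simp
  | cons x t ih =>
    by_cases hxc : x = c
    · subst hxc
      rw [List.filter_cons_of_pos (by simp)]
      have : t.filter (fun y => decide (y = x)) = [] := by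
        rw [List.filter_eq_nil_iff]
        intro a ha
        simp only [decide_eq_true_eq]
        intro h; exact (List.nodup_cons.mp hnd).1 (h ▸ ha)
      rw [this, if_pos (List.mem_cons_self ..)]
    · rw [List.filter_cons_of_neg (by simp [hxc]), ih (List.nodup_cons.mp hnd).2]
      have hiff : (c ∈ x :: t) ↔ (c ∈ t) := by
        constructor
        · intro h
          rcases List.mem_cons.mp h with h1 | h1
          · exact absurd h1.symm hxc
          · exact h1
        · exact fun h => List.mem_cons.mpr (Or.inr h)
      exact (if_congr hiff rfl rfl).symm

theorem pvFlatMapIfSingle (l : List Int) (hnd : l.Nodup) (k : Int) (g : Int → List (Int × Int)) :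
    (l.flatMap (fun s => if s = k then g s else [])) = if k ∈ l then g k else [] := by
  induction l with
  | nil => simp
  | cons x t ih =>
    simp only [List.flatMap_cons]
    by_cases hxk : x = k
    · subst hxk
      rw [if_pos rfl, if_pos (List.mem_cons_self ..)]
      have : t.flatMap (fun s => if s = x then g s else []) = [] := by
        rw [List.flatMap_eq_nil_iff]
        intro s hs
        rw [if_neg]
        intro h; exact (List.nodup_cons.mp hnd).1 (h ▸ hs)
      rw [this, List.append_nil]
    · rw [if_neg hxk, List.nil_append, ih (List.nodup_cons.mp hnd).2]
      have hiff : (k ∈ x :: t) ↔ (k ∈ t) := by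
        constructor
        · intro h
          rcases List.mem_cons.mp h with h1 | h1
          · exact absurd h1.symm hxk
          · exact h1
        · exact fun h => List.mem_cons.mpr (Or.inr h)
      exact (if_congr hiff rfl rfl).symm

theorem pvFilterRs (n s : Int) :
    (pvRs n).filter (fun p => decide (pvKey p = s)) = pvDiag n s := by
  unfold pvRs pvDiag
  rw [List.filter_flatMap]
  congr 1
  funext i
  rw [List.filter_map]
  have h1 : (PySem.List.pyRange 1 (n+1) 1).filter
      ((fun p => decide (pvKey p = s)) ∘ (fun j => pvEnt i j)) =
      (PySem.List.pyRange 1 (n+1) 1).filter (fun j => decide (j = s - i)) := by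
    apply List.filter_congr
    intro j _
    simp only [Function.comp_apply, pvKey_ent, decide_eq_decide]
    omega
  rw [h1, pvFilterEqSingle _ (PySem.List.nodup_pyRange_one ..) (s - i)]
  by_cases hc : 1 ≤ s - i ∧ s - i ≤ n
  · rw [if_pos ((PySem.List.mem_pyRange_one).mpr (by omega)), if_pos hc]
    rfl
  · rw [if_neg (fun hm => hc (by have := (PySem.List.mem_pyRange_one).mp hm; omega)), if_neg hc]
    rfl

theorem pvYsPairwise (n : Int) : (pvYs n).Pairwise (fun a b => pvKey a ≤ pvKey b) := by
  unfold pvYs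
  have gen : ∀ (l : List Int), l.Pairwise (· < ·) →
      (l.flatMap (fun s => pvDiag n s)).Pairwise (fun a b => pvKey a ≤ pvKey b) := by
    intro l
    induction l with
    | nil => intro _; simp
    | cons s t ih =>
      intro hp
      simp only [List.flatMap_cons]
      rw [List.pairwise_append]
      refine ⟨?_, ih hp.of_cons, ?_⟩
      · apply List.pairwise_of_forall_mem_list
        intro a ha b hb
        rw [pvMemDiagKey n s a ha, pvMemDiagKey n s b hb]
      · intro a ha b hb
        obtain ⟨s', hs', hb'⟩ := List.mem_flatMap.mp hb
        rw [pvMemDiagKey n s a ha, pvMemDiagKey n s' b hb']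
        exact le_of_lt (List.rel_of_pairwise_cons hp hs')
  exact gen _ (PySem.List.pairwise_lt_pyRange_one ..)

theorem pvFilterYs (n k : Int) :
    (pvYs n).filter (fun p => decide (pvKey p = k)) = pvDiag n k := by
  unfold pvYs
  rw [List.filter_flatMap]
  have h1 : ∀ s, (pvDiag n s).filter (fun p => decide (pvKey p = k)) =
      if s = k then pvDiag n s else [] := by
    intro s
    by_cases hsk : s = k
    · rw [if_pos hsk]
      apply List.filter_eq_self.mpr
      intro a ha
      simp [pvMemDiagKey n s a ha, hsk]
    · rw [if_neg hsk]
      rw [List.filter_eq_nil_iff]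
      intro a ha
      simp [pvMemDiagKey n s a ha, hsk]
  have h2 : ((PySem.List.pyRange 2 (2*n+1) 1).flatMap
        fun s => (pvDiag n s).filter (fun p => decide (pvKey p = k))) =
      (PySem.List.pyRange 2 (2*n+1) 1).flatMap (fun s => if s = k then pvDiag n s else []) := by
    congr 1
    funext s
    exact h1 s
  rw [h2, pvFlatMapIfSingle _ (PySem.List.nodup_pyRange_one ..) k]
  split
  · rfl
  · rename_i hmem
    rw [PySem.List.mem_pyRange_one] at hmem
    exact (pvDiagEmpty n k (by omega)).symm

theorem pvSortedRs (n : Int) :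
    PySem.List.sorted (pvRs n) pvKey false = pvYs n := by
  refine pvSortedEq pvKey _ _ (pvYsPairwise n) (fun k => ?_)
  rw [pvFilterYs n k, pvFilterRs n k]

theorem pvFlatMapCongr {α β : Type} (l : List α) (f g : α → List β)
    (h : ∀ x ∈ l, f x = g x) : l.flatMap f = l.flatMap g := by
  induction l with
  | nil => rfl
  | cons x t ih =>
    simp only [List.flatMap_cons]
    rw [h x (List.mem_cons_self ..), ih (fun y hy => h y (List.mem_cons.mpr (Or.inr hy)))]

-- full diagonals: for 2 ≤ s ≤ n+1
theorem pvDiagFull (n s : Int) (h2 : 2 ≤ s) (hn : s ≤ n + 1) :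
    pvDiag n s = (PySem.List.pyRange 1 s 1).map (fun i => pvEnt i (s - i)) := by
  unfold pvDiag
  rw [PySem.List.pyRange_one_append 1 s (n+1) (by omega) (by omega), List.flatMap_append]
  rw [pvFlatMapCongr (PySem.List.pyRange 1 s 1) _ (fun i => [pvEnt i (s - i)])
    (fun i hi => by
      have := (PySem.List.mem_pyRange_one).mp hi
      rw [if_pos (by omega)])]
  have hB : (PySem.List.pyRange s (n+1) 1).flatMap
      (fun i => if 1 ≤ s - i ∧ s - i ≤ n then [pvEnt i (s - i)] else []) = [] := by
    rw [List.flatMap_eq_nil_iff]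
    intro i hi
    have := (PySem.List.mem_pyRange_one).mp hi
    rw [if_neg (by omega)]
  rw [hB, List.append_nil, ← List.map_eq_flatMap]

-- length of the first m diagonals (all full), m ≤ n
theorem pvPrefixLen (n : Int) (m : Nat) (hm : (m : Int) ≤ n) :
    ((PySem.List.pyRange 2 ((m:Int)+2) 1).flatMap (fun s => pvDiag n s)).length
      = m * (m+1) / 2 := by
  induction m with
  | zero =>
    rw [show ((0:Nat):Int) + 2 = 2 by norm_num, PySem.List.pyRange_one_eq_nil (by omega)]
    rfl
  | succ m ih =>
    rw [show (((m+1:Nat)):Int) + 2 = ((m:Int) + 2) + 1 by push_cast; ring,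
        PySem.List.pyRange_one_succ_right (by omega), List.flatMap_append, List.length_append]
    have h1 := ih (by push_cast at hm ⊢; omega)
    have hone : (List.flatMap (fun s => pvDiag n s) [(m:Int)+2]).length = m + 1 := by
      rw [List.flatMap_singleton,
          pvDiagFull n ((m:Int)+2) (by omega) (by push_cast at hm; omega),
          List.length_map, PySem.List.length_pyRange_one]
      omega
    rw [h1, hone, show (m+1) * (m+1+1) = m*(m+1) + (m+1)*2 by ring,
        Nat.add_mul_div_right _ _ (by norm_num)]

-- ---- B-side loop characterisation ----

theorem pvFindLoopSpec (n : Int) : ∀ (d : Int), 1 ≤ d →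
    PySem.Int.floordiv (d*(d-1)) 2 < n →
    1 ≤ findLoop n d ∧
    PySem.Int.floordiv (findLoop n d * (findLoop n d - 1)) 2 < n ∧
    n ≤ PySem.Int.floordiv (findLoop n d * (findLoop n d + 1)) 2 := by
  suffices H : ∀ (m : Nat) (d : Int), (n - d).toNat ≤ m → 1 ≤ d →
      PySem.Int.floordiv (d*(d-1)) 2 < n →
      1 ≤ findLoop n d ∧
      PySem.Int.floordiv (findLoop n d * (findLoop n d - 1)) 2 < n ∧
      n ≤ PySem.Int.floordiv (findLoop n d * (findLoop n d + 1)) 2 by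
    exact fun d hd hlow => H (n - d).toNat d le_rfl hd hlow
  intro m
  induction m with
  | zero =>
    intro d hm hd hlow
    have hdge : d ≤ PySem.Int.floordiv (d*(d+1)) 2 := by
      rw [PySem.Int.le_floordiv_iff_mul_le (by norm_num)]
      nlinarith [pvMulPredNonneg d]
    have hnc : ¬ PySem.Int.floordiv (d*(d+1)) 2 < n := by omega
    rw [findLoop, if_neg hnc]
    exact ⟨hd, hlow, by omega⟩
  | succ m ih =>
    intro d hm hd hlow
    rw [findLoop]
    by_cases hc : PySem.Int.floordiv (d*(d+1)) 2 < n
    · rw [if_pos hc]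
      have hdge : d ≤ PySem.Int.floordiv (d*(d+1)) 2 := by
        rw [PySem.Int.le_floordiv_iff_mul_le (by norm_num)]
        nlinarith [pvMulPredNonneg d]
      refine ih (d+1) (by omega) (by omega) ?_
      rw [show (d+1)*((d+1)-1) = d*(d+1) by ring]
      exact hc
    · rw [if_neg hc]
      exact ⟨hd, hlow, by omega⟩

-- ---- the port's merge sort computes PySem.List.sorted ----

-- proof-side pure merge (never evaluated)
def pvMerge {α : Type} (key : α → Int) : List α → List α → List α
  | [], r => r
  | a :: l, [] => a :: l
  | a :: l, b :: r =>
    if key b < key a then b :: pvMerge key (a :: l) r else a :: pvMerge key l (b :: r)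
termination_by l r => l.length + r.length

theorem pvMergeFEq {α : Type} (key : α → Int) :
    ∀ (f : Nat) (acc l r : List α), l.length + r.length ≤ f →
    mergeF key f acc l r = acc.reverse ++ pvMerge key l r := by
  intro f
  induction f with
  | zero =>
    intro acc l r h
    have hl : l = [] := by cases l <;> simp_all
    have hr : r = [] := by cases r <;> simp_all
    subst hl; subst hr
    simp [mergeF, pvMerge]
  | succ f ih =>
    intro acc l r h
    match l, r with
    | [], r => simp [mergeF, pvMerge]
    | a :: l, [] => simp [mergeF, pvMerge]
    | a :: l, b :: r =>
      simp only [mergeF, pvMerge]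
      split
      · rw [ih (b :: acc) (a :: l) r (by simp at h ⊢; omega)]
        simp
      · rw [ih (a :: acc) l (b :: r) (by simp at h ⊢; omega)]
        simp

theorem pvMergeLen {α : Type} (key : α → Int) :
    ∀ (l r : List α), (pvMerge key l r).length = l.length + r.length := by
  intro l r
  fun_induction pvMerge key l r <;> simp_all <;> omega

theorem pvMergeMem {α : Type} (key : α → Int) :
    ∀ (l r : List α) (x : α), x ∈ pvMerge key l r ↔ x ∈ l ∨ x ∈ r := by
  intro l r
  fun_induction pvMerge key l r with
  | case1 r => simp
  | case2 a l => simp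
  | case3 a l b r hlt ih =>
    intro x
    simp only [List.mem_cons, ih]
    tauto
  | case4 a l b r hlt ih =>
    intro x
    simp only [List.mem_cons, ih]
    tauto

theorem pvMergePairwise {α : Type} (key : α → Int) :
    ∀ (l r : List α), l.Pairwise (fun a b => key a ≤ key b) →
    r.Pairwise (fun a b => key a ≤ key b) →
    (pvMerge key l r).Pairwise (fun a b => key a ≤ key b) := by
  intro l r
  fun_induction pvMerge key l r with
  | case1 r => intro _ hr; exact hr
  | case2 a l => intro hl _; exact hl
  | case3 a l b r hlt ih =>
    intro hl hr
    refine List.Pairwise.cons ?_ (ih hl hr.of_cons)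
    intro y hy
    rcases (pvMergeMem key (a :: l) r y).mp hy with hy' | hy'
    · have : key a ≤ key y := by
        rcases List.mem_cons.mp hy' with rfl | hy''
        · exact le_refl _
        · exact List.rel_of_pairwise_cons hl hy''
      omega
    · exact List.rel_of_pairwise_cons hr hy'
  | case4 a l b r hlt ih =>
    intro hl hr
    refine List.Pairwise.cons ?_ (ih hl.of_cons hr)
    intro y hy
    rcases (pvMergeMem key l (b :: r) y).mp hy with hy' | hy'
    · exact List.rel_of_pairwise_cons hl hy'
    · rcases List.mem_cons.mp hy' with rfl | hy''
      · omega
      · have := List.rel_of_pairwise_cons hr hy''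
        omega

theorem pvMergeFilter {α : Type} (key : α → Int) (k : Int) :
    ∀ (l r : List α), l.Pairwise (fun a b => key a ≤ key b) →
    (pvMerge key l r).filter (fun y => decide (key y = k)) =
      l.filter (fun y => decide (key y = k)) ++ r.filter (fun y => decide (key y = k)) := by
  intro l r
  fun_induction pvMerge key l r with
  | case1 r => intro _; simp
  | case2 a l => intro _; simp
  | case3 a l b r hlt ih =>
    intro hl
    have hmerge := ih hl
    by_cases hbk : key b = k
    · have hnil : (a :: l).filter (fun y => decide (key y = k)) = [] := by
        rw [List.filter_eq_nil_iff]
        intro y hy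
        have : key a ≤ key y := by
          rcases List.mem_cons.mp hy with rfl | hy'
          · exact le_refl _
          · exact List.rel_of_pairwise_cons hl hy'
        simp only [decide_eq_true_eq]
        omega
      rw [List.filter_cons_of_pos (a := b) (l := pvMerge key (a :: l) r) (by simp [hbk]),
          hmerge, List.filter_cons_of_pos (a := b) (l := r) (by simp [hbk]), hnil]
      simp
    · rw [List.filter_cons_of_neg (a := b) (l := pvMerge key (a :: l) r) (by simp [hbk]),
          hmerge, List.filter_cons_of_neg (a := b) (l := r) (by simp [hbk])]
  | case4 a l b r hlt ih =>
    intro hl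
    have hmerge := ih hl.of_cons
    by_cases hak : key a = k
    · rw [List.filter_cons_of_pos (a := a) (l := pvMerge key l (b :: r)) (by simp [hak]),
          hmerge, List.filter_cons_of_pos (a := a) (l := l) (by simp [hak])]
      simp
    · rw [List.filter_cons_of_neg (a := a) (l := pvMerge key l (b :: r)) (by simp [hak]),
          hmerge, List.filter_cons_of_neg (a := a) (l := l) (by simp [hak])]

theorem pvPairwiseShort {α : Type} (R : α → α → Prop) (l : List α) (h : l.length ≤ 1) :
    l.Pairwise R := by
  match l with
  | [] => exact List.Pairwise.nil
  | [x] => exact List.pairwise_singleton R x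
  | x :: y :: t => simp at h

theorem pvMsortLen {α : Type} (key : α → Int) :
    ∀ (f : Nat) (l : List α), l.length ≤ f → (msortF key f l).length = l.length := by
  intro f
  induction f with
  | zero => intro l _; rfl
  | succ f ih =>
    intro l hl
    simp only [msortF]
    by_cases h1 : l.length ≤ 1
    · rw [if_pos h1]
    · have hta : (l.take (l.length / 2)).length ≤ f := by rw [List.length_take]; omega
      have hda : (l.drop (l.length / 2)).length ≤ f := by rw [List.length_drop]; omega
      rw [if_neg h1, pvMergeFEq key l.length [] _ _
            (by rw [ih _ hta, ih _ hda, List.length_take, List.length_drop]; omega)]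
      simp only [List.reverse_nil, List.nil_append, pvMergeLen]
      rw [ih _ hta, ih _ hda, List.length_take, List.length_drop]
      omega

theorem pvMsortPairwise {α : Type} (key : α → Int) :
    ∀ (f : Nat) (l : List α), l.length ≤ f →
    (msortF key f l).Pairwise (fun a b => key a ≤ key b) := by
  intro f
  induction f with
  | zero => intro l hl; simp only [msortF]; exact pvPairwiseShort _ _ (by omega)
  | succ f ih =>
    intro l hl
    simp only [msortF]
    by_cases h1 : l.length ≤ 1
    · rw [if_pos h1]; exact pvPairwiseShort _ _ h1
    · have hta : (l.take (l.length / 2)).length ≤ f := by rw [List.length_take]; omega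
      have hda : (l.drop (l.length / 2)).length ≤ f := by rw [List.length_drop]; omega
      rw [if_neg h1, pvMergeFEq key l.length [] _ _
            (by rw [pvMsortLen key f _ hta, pvMsortLen key f _ hda,
                    List.length_take, List.length_drop]; omega)]
      simp only [List.reverse_nil, List.nil_append]
      exact pvMergePairwise key _ _ (ih _ hta) (ih _ hda)

theorem pvMsortFilter {α : Type} (key : α → Int) (k : Int) :
    ∀ (f : Nat) (l : List α), l.length ≤ f →
    (msortF key f l).filter (fun y => decide (key y = k)) =
      l.filter (fun y => decide (key y = k)) := by
  intro f
  induction f with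
  | zero => intro l hl; rfl
  | succ f ih =>
    intro l hl
    simp only [msortF]
    by_cases h1 : l.length ≤ 1
    · rw [if_pos h1]
    · have hta : (l.take (l.length / 2)).length ≤ f := by rw [List.length_take]; omega
      have hda : (l.drop (l.length / 2)).length ≤ f := by rw [List.length_drop]; omega
      rw [if_neg h1, pvMergeFEq key l.length [] _ _
            (by rw [pvMsortLen key f _ hta, pvMsortLen key f _ hda,
                    List.length_take, List.length_drop]; omega)]
      simp only [List.reverse_nil, List.nil_append]
      rw [pvMergeFilter key k _ _ (pvMsortPairwise key f _ hta), ih _ hta, ih _ hda,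
          ← List.filter_append, List.take_append_drop]

theorem pvMsortEqSorted {α : Type} (key : α → Int) (l : List α) :
    msortF key l.length l = PySem.List.sorted l key false :=
  (pvSortedEq key l _ (pvMsortPairwise key l.length l le_rfl)
    (fun k => pvMsortFilter key k l.length l le_rfl)).symm

theorem pvMsortRs (n : Int) :
    msortF (fun x : Int × Int => x.1 + x.2) (pvRs n).length (pvRs n) = pvYs n :=
  (pvMsortEqSorted pvKey (pvRs n)).trans (pvSortedRs n)

-- ===== VERDICT (by name: the statement is the Claim_ definition above) =====
theorem find_spec : Claim_equal_find := by
  unfold Claim_equal_find Spec_find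
  intro n _ hn
  have hn1 : (1:Int) ≤ n := hn
  have hstart : PySem.Int.floordiv (1*(1-1)) 2 < n := by
    rw [show (1:Int)*(1-1) = 0 by ring,
        PySem.Int.floordiv_eq_ediv_of_pos (by norm_num)]
    simpa using hn1
  obtain ⟨hd1, hlow, hhigh⟩ := pvFindLoopSpec n 1 le_rfl hstart
  set d := findLoop n 1 with hddef
  set m : Nat := (d-1).toNat with hmdef
  have hm : (m:Int) = d - 1 := Int.toNat_of_nonneg (by omega)
  have hdm : d = (m:Int) + 1 := by omega
  have hlowC : PySem.Int.floordiv (d*(d-1)) 2 = (((m+1)*m / 2 : Nat) : Int) := by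
    rw [show d*(d-1) = (((m+1)*m : Nat) : Int) by push_cast; rw [hdm]; ring]
    exact_mod_cast PySem.Int.floordiv_natCast ((m+1)*m) 2
  have hhighC : PySem.Int.floordiv (d*(d+1)) 2 = (((m+1)*(m+2) / 2 : Nat) : Int) := by
    rw [show d*(d+1) = (((m+1)*(m+2) : Nat) : Int) by push_cast; rw [hdm]; ring]
    exact_mod_cast PySem.Int.floordiv_natCast ((m+1)*(m+2)) 2
  rw [hlowC] at hlow
  rw [hhighC] at hhigh
  -- arithmetic links between the triangular numbers
  have hA1 : (m+1)*m/2 = m*(m+1)/2 := by rw [Nat.mul_comm]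
  have hA2 : (m+1)*(m+1+1)/2 = m*(m+1)/2 + (m+1) := by
    rw [show (m+1)*(m+1+1) = m*(m+1) + (m+1)*2 by ring,
        Nat.add_mul_div_right _ _ (by norm_num)]
  have hA3 : (m+1)*(m+2)/2 = m*(m+1)/2 + (m+1) := by
    rw [show (m+1)*(m+2) = m*(m+1) + (m+1)*2 by ring,
        Nat.add_mul_div_right _ _ (by norm_num)]
  have hTm_ge : m ≤ (m+1)*m/2 := by
    cases m with
    | zero => simp
    | succ m' =>
      rw [Nat.le_div_iff_mul_le (by norm_num)]
      nlinarith
  have hdn : d ≤ n := by omega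
  have hmn : (m:Int) ≤ n := by omega
  have hm1n : (((m+1 : Nat)):Int) ≤ n := by push_cast; omega
  have hP' := pvPrefixLen n m hmn
  have hP := pvPrefixLen n (m+1) hm1n
  have hj : (((n-1).toNat) : Int) = n - 1 := Int.toNat_of_nonneg (by omega)
  have hsplit1 : PySem.List.pyRange 2 (2*n+1) 1 =
      PySem.List.pyRange 2 (((m+1:Nat):Int) + 2) 1 ++
        PySem.List.pyRange (((m+1:Nat):Int) + 2) (2*n+1) 1 :=
    PySem.List.pyRange_one_append 2 _ _ (by push_cast; omega) (by push_cast; omega)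
  have hsplit2 : PySem.List.pyRange 2 (((m+1:Nat):Int) + 2) 1 =
      PySem.List.pyRange 2 ((m:Int) + 2) 1 ++ [(m:Int)+2] := by
    rw [show ((m+1:Nat):Int) + 2 = ((m:Int)+2)+1 by push_cast; ring]
    exact PySem.List.pyRange_one_succ_right (by omega)
  have hget : PySem.List.pyGet? (pvYs n) (n-1) =
      some (pvEnt (1 + ((((n-1).toNat - m*(m+1)/2 : Nat)) : Int))
        (((m:Int)+2) - (1 + ((((n-1).toNat - m*(m+1)/2 : Nat)) : Int)))) := by
    rw [PySem.List.pyGet?_of_nonneg _ (by omega)]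
    unfold pvYs
    rw [hsplit1, List.flatMap_append, List.getElem?_append_left (by rw [hP]; omega),
        hsplit2, List.flatMap_append, List.getElem?_append_right (by rw [hP']; omega),
        hP', List.flatMap_cons, List.flatMap_nil, List.append_nil,
        pvDiagFull n ((m:Int)+2) (by omega) (by omega),
        List.getElem?_map, PySem.List.getElem?_pyRange_one,
        if_pos (by omega : (n-1).toNat - m*(m+1)/2 < (((m:Int)+2) - 1).toNat)]
    rfl
  have hK : (1 + ((((n-1).toNat - m*(m+1)/2 : Nat)) : Int)) =
      n - PySem.Int.floordiv (d*(d-1)) 2 := by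
    rw [hlowC, Nat.cast_sub (by omega)]
    omega
  have hS : ((m:Int) + 2) = d + 1 := by omega
  rw [hK, hS] at hget
  simp only [find, pvRsEq, pvMsortRs, hget]
  simp only [find_alt, ← hddef]
  unfold pvEnt
  rw [show (n - PySem.Int.floordiv (d*(d-1)) 2) +
      ((d+1) - (n - PySem.Int.floordiv (d*(d-1)) 2)) = d + 1 by ring]
  by_cases hpar : PySem.Int.mod (d+1) 2 = 1
  · rw [if_pos hpar, if_pos hpar]
  · rw [if_neg hpar, if_neg hpar]
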